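-- pv_equiv track=rewrite | github.com/refactory-lang/ai-coding-lang-bench | generated/minigit-python-mypy-7-v2/minigit.py | parse_commit
-- ===== SOURCE A (Python) =====
-- def parse_commit(content: str) -> tuple[str, str, str, list[tuple[str, str]]]:
--     """Parse commit content, return (parent, timestamp, message, files)."""
--     parent: str = "NONE"
--     timestamp: str = ""
--     message: str = ""
--     files: list[tuple[str, str]] = []
--     in_files: bool = False
--     for line in content.splitlines():
--         if in_files:
--             parts: list[str] = line.split(" ", 1)
--             if len(parts) == 2:
--                 files.append((parts[0], parts[1]))
--         elif line.startswith("parent: "):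
--             parent = line[len("parent: "):]
--         elif line.startswith("timestamp: "):
--             timestamp = line[len("timestamp: "):]
--         elif line.startswith("message: "):
--             message = line[len("message: "):]
--         elif line == "files:":
--             in_files = True
--     return parent, timestamp, message, files
-- ===== SOURCE B (Python) =====
-- def parse_commit(content: str) -> tuple[str, str, str, list[tuple[str, str]]]:
--     """Parse commit content, return (parent, timestamp, message, files)."""
--     lines = content.splitlines()
--     try:
--         boundary = lines.index("files:")
--     except ValueError:
--         boundary = len(lines)
--     parent, timestamp, message = "NONE", "", ""
--     for line in lines[:boundary]:
--         if line.startswith("parent: "):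
--             parent = line[len("parent: "):]
--         elif line.startswith("timestamp: "):
--             timestamp = line[len("timestamp: "):]
--         elif line.startswith("message: "):
--             message = line[len("message: "):]
--     files = [(p[0], p[1])
--              for p in (line.split(" ", 1) for line in lines[boundary + 1:])
--              if len(p) == 2]
--     return parent, timestamp, message, files
-- ===== Notes on version B (the rewrite author's own statement) =====
-- stated objective: simpler
-- what changed: Replaces the single stateful loop with an in_files flag by locating the first 'files:' line with list.index and then parsing the header slice and the files slice in two independent passes (the files pass a comprehension).
import Mathlib
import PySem

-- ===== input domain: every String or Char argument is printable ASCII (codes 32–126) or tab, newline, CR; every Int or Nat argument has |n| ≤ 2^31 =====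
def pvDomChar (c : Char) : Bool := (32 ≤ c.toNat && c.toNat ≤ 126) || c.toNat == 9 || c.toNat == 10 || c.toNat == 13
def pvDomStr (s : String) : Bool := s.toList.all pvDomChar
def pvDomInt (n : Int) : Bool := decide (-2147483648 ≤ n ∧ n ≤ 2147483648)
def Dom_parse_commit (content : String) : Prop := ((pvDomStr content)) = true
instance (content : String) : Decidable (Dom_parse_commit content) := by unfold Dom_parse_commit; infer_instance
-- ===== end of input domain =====

-- B replaces A's single stateful loop (in_files flag) by locating the first "files:" line and
-- parsing the header slice and the files slice in two independent passes (objective: simpler).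


-- ===== PORT A =====
-- the body of A's single for-loop over splitlines, state = (parent, timestamp, message, files, in_files)
def pvAStep (s : String × String × String × List (String × String) × Bool) (line : String) :
    String × String × String × List (String × String) × Bool :=
  let (parent, timestamp, message, files, in_files) := s
  if in_files then
    -- parts = line.split(" ", 1); if len(parts) == 2: files.append((parts[0], parts[1]))
    match PySem.Str.splitMax? line " " 1 with
    | some [a, b] => (parent, timestamp, message, files ++ [(a, b)], in_files)
    | _ => (parent, timestamp, message, files, in_files)
  else if PySem.Str.startswith line "parent: " then
    (PySem.Str.slice line (some 8) none, timestamp, message, files, in_files)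
  else if PySem.Str.startswith line "timestamp: " then
    (parent, PySem.Str.slice line (some 11) none, message, files, in_files)
  else if PySem.Str.startswith line "message: " then
    (parent, timestamp, PySem.Str.slice line (some 9) none, files, in_files)
  else if line == "files:" then
    (parent, timestamp, message, files, true)
  else (parent, timestamp, message, files, in_files)

def parse_commit (content : String) : String × String × String × (List (String × String)) :=
  let st := (PySem.Str.splitlines content).foldl pvAStep ("NONE", "", "", [], false)
  (st.1, st.2.1, st.2.2.1, st.2.2.2.1)

-- ===== PORT B =====
-- header pass: last matching prefix wins, state = (parent, timestamp, message)
def pvHeaderStep (s : String × String × String) (line : String) : String × String × String :=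
  if PySem.Str.startswith line "parent: " then
    (PySem.Str.slice line (some 8) none, s.2.1, s.2.2)
  else if PySem.Str.startswith line "timestamp: " then
    (s.1, PySem.Str.slice line (some 11) none, s.2.2)
  else if PySem.Str.startswith line "message: " then
    (s.1, s.2.1, PySem.Str.slice line (some 9) none)
  else s

-- the comprehension's filter+map: a pair iff line.split(" ", 1) has exactly two parts
def pvFileEntry (line : String) : Option (String × String) :=
  match PySem.Str.splitMax? line " " 1 with
  | some [a, b] => some (a, b)
  | _ => none

def parse_commit_alt (content : String) : String × String × String × (List (String × String)) :=
  let lines := PySem.Str.splitlines content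
  let boundary := (PySem.List.index? lines "files:").getD lines.length
  let hdr := (lines.take boundary).foldl pvHeaderStep ("NONE", "", "")
  let files := (lines.drop (boundary + 1)).filterMap pvFileEntry
  (hdr.1, hdr.2.1, hdr.2.2, files)

-- ===== PRECONDITION & SPEC =====
def Spec_parse_commit (content : String) (out : String × String × String × (List (String × String))) : Prop := out = parse_commit_alt content
instance (content : String) (out : String × String × String × (List (String × String))) : Decidable (Spec_parse_commit content out) := by unfold Spec_parse_commit; infer_instance

-- ===== CLAIM (what is proved, stated in full; the proofs are below) =====
def Claim_equal_parse_commit : Prop := ∀ (content : String), Dom_parse_commit content → Spec_parse_commit content (parse_commit content)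

-- ===== LEMMAS AND PROOFS =====

-- once in_files is set, A only ever appends the two-part splits: the files-mode fold is a filterMap
lemma pvFilesFold (lines : List String) (p t m : String) (fs : List (String × String)) :
    lines.foldl pvAStep (p, t, m, fs, true)
      = (p, t, m, fs ++ lines.filterMap pvFileEntry, true) := by
  induction lines generalizing fs with
  | nil => simp
  | cons l ls ih =>
      have hstep : pvAStep (p, t, m, fs, true) l
          = (p, t, m, fs ++ (pvFileEntry l).toList, true) := by
        unfold pvAStep pvFileEntry
        rcases h : PySem.Str.splitMax? l " " 1 with _ | xs
        · simp
        · rcases xs with _ | ⟨a, _ | ⟨b, _ | _⟩⟩ <;> simp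
      simp only [List.foldl_cons, hstep, ih, List.filterMap_cons]
      cases pvFileEntry l <;> simp

-- before the first "files:" line, A's loop body acts exactly as B's header pass
lemma pvHeaderFold (lines : List String) (hnf : "files:" ∉ lines) (p t m : String)
    (fs : List (String × String)) :
    lines.foldl pvAStep (p, t, m, fs, false)
      = ((lines.foldl pvHeaderStep (p, t, m)).1,
         (lines.foldl pvHeaderStep (p, t, m)).2.1,
         (lines.foldl pvHeaderStep (p, t, m)).2.2, fs, false) := by
  induction lines generalizing p t m with
  | nil => simp
  | cons l ls ih =>
      have hl : l ≠ "files:" := fun h => hnf (h ▸ List.mem_cons_self)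
      have hls : "files:" ∉ ls := fun h => hnf (List.mem_cons_of_mem _ h)
      have hstep : pvAStep (p, t, m, fs, false) l
          = ((pvHeaderStep (p, t, m) l).1, (pvHeaderStep (p, t, m) l).2.1,
             (pvHeaderStep (p, t, m) l).2.2, fs, false) := by
        unfold pvAStep pvHeaderStep
        split_ifs with h1 h2 h3 h4 <;> simp_all
      simp only [List.foldl_cons, hstep]
      rcases hp : pvHeaderStep (p, t, m) l with ⟨p', t', m'⟩
      exact ih hls p' t' m'

-- ===== VERDICT (by name: the statement is the Claim_ definition above) =====
theorem parse_commit_spec : Claim_equal_parse_commit := by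
  intro content _
  show parse_commit content = parse_commit_alt content
  unfold parse_commit parse_commit_alt
  rcases h : PySem.List.index? (PySem.Str.splitlines content) "files:" with _ | k
  · -- no "files:" line: header fold covers everything, files stays []
    have hnf : "files:" ∉ PySem.Str.splitlines content :=
      (PySem.List.index?_eq_none_iff _ _).mp h
    simp only [h, Option.getD_none, List.take_length,
      pvHeaderFold _ hnf "NONE" "" "" []]
    have hd : (PySem.Str.splitlines content).drop ((PySem.Str.splitlines content).length + 1)
        = [] := List.drop_eq_nil_of_le (by omega)
    simp [hd]
  · -- lines = pre ++ "files:" :: suf with "files:" ∉ pre, k = pre.length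
    obtain ⟨pre, suf, hsplit, hlen, hnf⟩ :=
      (PySem.List.index?_eq_some_iff _ _ _).mp h
    have hflip : ∀ p t m : String,
        pvAStep (p, t, m, ([] : List (String × String)), false) "files:"
          = (p, t, m, [], true) := by
      have e1 : PySem.Chars.startswith ['f','i','l','e','s',':'] ['p','a','r','e','n','t',':',' '] = false := by decide
      have e2 : PySem.Chars.startswith ['f','i','l','e','s',':'] ['t','i','m','e','s','t','a','m','p',':',' '] = false := by decide
      have e3 : PySem.Chars.startswith ['f','i','l','e','s',':'] ['m','e','s','s','a','g','e',':',' '] = false := by decide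
      intro p t m; unfold pvAStep; simp [e1, e2, e3]
    have hA : (PySem.Str.splitlines content).foldl pvAStep ("NONE", "", "", [], false)
        = ((pre.foldl pvHeaderStep ("NONE", "", "")).1,
           (pre.foldl pvHeaderStep ("NONE", "", "")).2.1,
           (pre.foldl pvHeaderStep ("NONE", "", "")).2.2,
           suf.filterMap pvFileEntry, true) := by
      rw [hsplit, List.foldl_append, pvHeaderFold pre hnf, List.foldl_cons, hflip,
        pvFilesFold]
      simp
    have htake : (PySem.Str.splitlines content).take k = pre := by
      rw [hsplit, ← hlen, List.take_left]
    have hdrop : (PySem.Str.splitlines content).drop (k + 1) = suf := by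
      rw [hsplit, ← hlen]
      have : pre ++ "files:" :: suf = (pre ++ ["files:"]) ++ suf := by simp
      rw [this, show pre.length + 1 = (pre ++ ["files:"]).length by simp,
        List.drop_left]
    simp only [h, Option.getD_some, htake, hdrop, hA]
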